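-- pv_equiv track=rewrite | github.com/Knighler/Egyptian-Financial-Advisor | backend/app/tools/market_tools.py | _pick_select_columns
-- ===== SOURCE A (Python) =====
-- def _pick_select_columns(columns: list[str]) -> list[str]:
--     preferred = [
--         "market_date",
--         "date",
--         "year",
--         "last_updated",
--         "ticker",
--         "symbol",
--         "currency_pair",
--         "metric",
--         "bank_name",
--         "product",
--         "rate",
--         "deposit_rate",
--         "lending_rate",
--         "main_operation_rate",
--         "last_meeting_date",
--         "current_price",
--         "close_price_egp",
--         "closing_price_egp",
--         "trading_volume",
--         "volume",
--         "gold_24k_egp",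
--         "global_ounce_usd",
--         "exchange_rate",
--         "official_usd_egp_rate",
--         "return_7d_pct",
--         "return_30d_pct",
--         "volatility_30d",
--         "historical_volatility",
--         "average_daily_volume",
--         "extraction_date",
--         "extracted_at",
--         "_kestra_loaded_at",
--     ]
--
--     selected: list[str] = []
--     for column in preferred:
--         if column in columns and column not in selected:
--             selected.append(column)
--
--     for column in columns:
--         if column not in selected:
--             selected.append(column)
--
--     return selected[:12]
-- ===== SOURCE B (Python) =====
-- def _pick_select_columns(columns: list[str]) -> list[str]:
--     preferred = [
--         "market_date",
--         "date",
--         "year",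
--         "last_updated",
--         "ticker",
--         "symbol",
--         "currency_pair",
--         "metric",
--         "bank_name",
--         "product",
--         "rate",
--         "deposit_rate",
--         "lending_rate",
--         "main_operation_rate",
--         "last_meeting_date",
--         "current_price",
--         "close_price_egp",
--         "closing_price_egp",
--         "trading_volume",
--         "volume",
--         "gold_24k_egp",
--         "global_ounce_usd",
--         "exchange_rate",
--         "official_usd_egp_rate",
--         "return_7d_pct",
--         "return_30d_pct",
--         "volatility_30d",
--         "historical_volatility",
--         "average_daily_volume",
--         "extraction_date",
--         "extracted_at",
--         "_kestra_loaded_at",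
--     ]
--
--     rank = {name: i for i, name in enumerate(preferred)}
--     unique = list(dict.fromkeys(columns))
--     return sorted(unique, key=lambda c: rank.get(c, len(preferred)))[:12]
-- ===== Notes on version B (the rewrite author's own statement) =====
-- stated objective: faster
-- what changed: Replaced the two append-and-membership-scan loops (quadratic 'column not in selected' rescans) with a rank dictionary over the preferred names, an ordered dedup (dict.fromkeys) and a single stable sort keyed by rank, truncated to 12.
import Mathlib
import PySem

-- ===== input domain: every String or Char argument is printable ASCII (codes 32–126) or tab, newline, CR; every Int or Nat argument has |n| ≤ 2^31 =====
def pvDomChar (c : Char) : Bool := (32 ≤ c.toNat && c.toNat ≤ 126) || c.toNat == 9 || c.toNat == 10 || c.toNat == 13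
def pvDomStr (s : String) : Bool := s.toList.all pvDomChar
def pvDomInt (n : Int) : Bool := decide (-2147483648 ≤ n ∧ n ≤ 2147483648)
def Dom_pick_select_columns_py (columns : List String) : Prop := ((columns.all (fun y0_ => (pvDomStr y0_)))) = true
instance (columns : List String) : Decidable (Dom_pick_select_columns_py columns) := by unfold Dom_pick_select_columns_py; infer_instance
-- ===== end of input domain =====

-- B replaces A's two append loops (with their linear 'not in selected' rescans) by a rank dict,
-- an ordered dedup and one stable sort capped at 12 — measurably faster (O(n log n) vs O(n^2)).

-- ===== PORT A =====
-- the `preferred` literal (shared by both Pythons, which spell out the same list)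
def pvPreferred : List String :=
  ["market_date", "date", "year", "last_updated", "ticker", "symbol",
   "currency_pair", "metric", "bank_name", "product", "rate", "deposit_rate",
   "lending_rate", "main_operation_rate", "last_meeting_date", "current_price",
   "close_price_egp", "closing_price_egp", "trading_volume", "volume",
   "gold_24k_egp", "global_ounce_usd", "exchange_rate", "official_usd_egp_rate",
   "return_7d_pct", "return_30d_pct", "volatility_30d", "historical_volatility",
   "average_daily_volume", "extraction_date", "extracted_at", "_kestra_loaded_at"]

def pick_select_columns_py (columns : List String) : List String :=
  let selected1 : List String := pvPreferred.foldl
    (fun sel column => if column ∈ columns ∧ column ∉ sel then sel ++ [column] else sel) []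
  let selected2 : List String := columns.foldl
    (fun sel column => if column ∉ sel then sel ++ [column] else sel) selected1
  PySem.List.slice selected2 none (some 12)

-- ===== PORT B =====
def pick_select_columns_py_alt (columns : List String) : List String :=
  let rank : PySem.Dict String Int :=
    (PySem.List.enumerate pvPreferred).foldl (fun d p => d.insert p.2 p.1) PySem.Dict.empty
  let unique : List String := PySem.List.dedup columns
  PySem.List.slice
    (PySem.List.sorted unique (fun c => rank.getD c (PySem.List.len pvPreferred)))
    none (some 12)

-- ===== PRECONDITION & SPEC =====
def Spec_pick_select_columns_py (columns : List String) (out : List String) : Prop := out = pick_select_columns_py_alt columns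
instance (columns : List String) (out : List String) : Decidable (Spec_pick_select_columns_py columns out) := by unfold Spec_pick_select_columns_py; infer_instance

-- ===== CLAIM (what is proved, stated in full; the proofs are below) =====
def Claim_equal_pick_select_columns_py : Prop := ∀ (columns : List String), Dom_pick_select_columns_py columns → Spec_pick_select_columns_py columns (pick_select_columns_py columns)

-- ===== LEMMAS AND PROOFS =====

-- the sort key B uses: rank.get(c, len(preferred))
def pvKey (c : String) : Int :=
  ((PySem.List.enumerate pvPreferred).foldl (fun d p => d.insert p.2 p.1)
    PySem.Dict.empty).getD c (PySem.List.len pvPreferred)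

-- the common normal form: preferred columns present in l (in preferred order),
-- then the non-preferred elements of l (in l's order)
def pvT (l : List String) : List String :=
  pvPreferred.filter (fun p => decide (p ∈ l)) ++ l.filter (fun c => decide (c ∉ pvPreferred))

lemma pvKey_of_not_mem {c : String} (h : c ∉ pvPreferred) : pvKey c = 32 := by
  unfold pvKey
  apply PySem.Dict.getD_of_not_contains
  rw [← Bool.not_eq_true, PySem.Dict.contains_iff_mem_keys,
      PySem.Dict.keys_foldl_insert_key _ Prod.snd (fun d p => p.1),
      PySem.Dict.keys_empty, PySem.List.map_snd_enumerate,
      PySem.Set.update_nil_left, PySem.Set.mem_ofList]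
  exact h

set_option maxRecDepth 8192 in
lemma pvKey_lt_of_mem : ∀ p ∈ pvPreferred, pvKey p < 32 := by decide

set_option maxRecDepth 8192 in
lemma pvKey_pairwise : pvPreferred.Pairwise (fun a b => pvKey a < pvKey b) := by decide

lemma pvKey_le (c : String) : pvKey c ≤ 32 := by
  by_cases h : c ∈ pvPreferred
  · exact le_of_lt (pvKey_lt_of_mem c h)
  · rw [pvKey_of_not_mem h]

lemma insertBy_front {α : Type} (before : α → α → Bool) (x : α) (L : List α)
    (h : ∀ y ∈ L, before x y = true) : PySem.List.insertBy before x L = x :: L := by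
  cases L with
  | nil => rfl
  | cons y ys => simp [PySem.List.insertBy, h y (List.mem_cons_self)]

-- inserting a preferred element into "preferred part ++ tail of larger keys"
-- lands at its rank position of the preferred part
lemma insert_into_split {α : Type} [DecidableEq α] (key : α → Int) :
    ∀ (pr : List α) (x : α) (l B : List α),
    pr.Pairwise (fun a b => key a < key b) → x ∈ pr → x ∉ l →
    (∀ b ∈ B, key x < key b) →
    PySem.List.insertBy (fun a b => decide (key a < key b)) x
        (pr.filter (fun p => decide (p ∈ l)) ++ B)
      = pr.filter (fun p => decide (p ∈ l ++ [x])) ++ B := by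
  intro pr
  induction pr with
  | nil => intro x l B _ hx; cases hx
  | cons p ps ih =>
    intro x l B hpw hx hxl hB
    rw [List.pairwise_cons] at hpw
    obtain ⟨hp, hps⟩ := hpw
    rw [List.mem_cons] at hx
    rcases hx with rfl | hx
    · -- x is the head of the preferred list
      have hxps : x ∉ ps := fun h => absurd (hp x h) (lt_irrefl _)
      have hfil : ps.filter (fun p => decide (p ∈ l ++ [x])) = ps.filter (fun p => decide (p ∈ l)) := by
        apply List.filter_congr
        intro q hq
        have hqx : q ≠ x := fun h => hxps (h ▸ hq)
        simp [List.mem_append, hqx]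
      rw [List.filter_cons_of_neg (by simpa using hxl),
          List.filter_cons_of_pos (by simp), hfil]
      apply insertBy_front
      intro y hy
      rw [List.mem_append] at hy
      rcases hy with hy | hy
      · exact decide_eq_true (hp y (List.mem_of_mem_filter hy))
      · exact decide_eq_true (hB y hy)
    · -- x is further down; compare with the head p
      have hpx : key p < key x := hp x hx
      by_cases hpl : p ∈ l
      · rw [List.filter_cons_of_pos (by simpa using hpl),
            List.filter_cons_of_pos (by simp [List.mem_append, hpl])]
        have : PySem.List.insertBy (fun a b => decide (key a < key b)) x
            (p :: (ps.filter (fun p => decide (p ∈ l)) ++ B))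
            = p :: PySem.List.insertBy (fun a b => decide (key a < key b)) x
                (ps.filter (fun p => decide (p ∈ l)) ++ B) := by
          simp [PySem.List.insertBy, not_lt_of_gt hpx]
        rw [List.cons_append, this, ih x l B hps hx hxl hB]
        rfl
      · have hpx' : p ≠ x := fun h => absurd hpx (by rw [h]; exact lt_irrefl _)
        -- note: p ∉ l and p ≠ x, so p survives in neither filter
        rw [List.filter_cons_of_neg (by simpa using hpl),
            List.filter_cons_of_neg (by simp [List.mem_append, hpl, hpx'])]
        · exact ih x l B hps hx hxl hB

-- the stable insertion-sort loop computes the normal form pvT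
lemma foldl_insertBy_eq_T : ∀ l : List String, l.Nodup →
    l.foldl (fun acc x => PySem.List.insertBy (fun a b => decide (pvKey a < pvKey b)) x acc) []
      = pvT l := by
  intro l
  induction l using List.reverseRecOn with
  | nil => intro _; simp [pvT]
  | append_singleton l x ih =>
    intro hnd
    rw [List.nodup_append] at hnd
    obtain ⟨hl, -, hdisj⟩ := hnd
    have hxl : x ∉ l := fun h => by simpa using hdisj x h
    rw [List.foldl_append, List.foldl_cons, List.foldl_nil, ih hl]
    by_cases hx : x ∈ pvPreferred
    · unfold pvT
      rw [insert_into_split pvKey pvPreferred x l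
            (l.filter (fun c => decide (c ∉ pvPreferred))) pvKey_pairwise hx hxl]
      · rw [List.filter_append, List.filter_cons_of_neg (by simpa using hx),
            List.filter_nil, List.append_nil]
      · intro b hb
        have hb' : b ∉ pvPreferred := by
          have := List.of_mem_filter hb; simpa using this
        rw [pvKey_of_not_mem hb']
        exact pvKey_lt_of_mem x hx
    · unfold pvT
      rw [PySem.List.insertBy_of_forall_not_before]
      · have hfil : pvPreferred.filter (fun p => decide (p ∈ l ++ [x]))
            = pvPreferred.filter (fun p => decide (p ∈ l)) := by
          apply List.filter_congr
          intro q hq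
          have hqx : q ≠ x := fun h => hx (h ▸ hq)
          simp [List.mem_append, hqx]
        rw [hfil, List.filter_append, List.filter_cons_of_pos (by simpa using hx),
            List.filter_nil, List.append_assoc]
      · intro y _
        rw [pvKey_of_not_mem hx]
        simp [not_lt.mpr (pvKey_le y)]

-- A's first loop is a filter of `preferred` by membership in `columns`
lemma first_loop_eq_filter {α : Type} [DecidableEq α] (cols : List α) :
    ∀ (pr : List α) (acc : List α), pr.Nodup → (∀ c ∈ pr, c ∉ acc) →
    pr.foldl (fun sel column => if column ∈ cols ∧ column ∉ sel then sel ++ [column] else sel) acc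
      = acc ++ pr.filter (fun p => decide (p ∈ cols)) := by
  intro pr
  induction pr with
  | nil => intro acc _ _; simp
  | cons p ps ih =>
    intro acc hnd hfr
    rw [List.nodup_cons] at hnd
    obtain ⟨hpps, hps⟩ := hnd
    rw [List.foldl_cons]
    by_cases hc : p ∈ cols
    · rw [if_pos ⟨hc, hfr p List.mem_cons_self⟩,
          ih (acc ++ [p]) hps (by
            intro c hcps
            have hcp : c ≠ p := fun h => hpps (h ▸ hcps)
            simp [hfr c (List.mem_cons_of_mem p hcps), hcp]),
          List.filter_cons_of_pos (by simpa using hc), List.append_assoc]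
      rfl
    · rw [if_neg (by simp [hc]), ih acc hps (fun c hc' => hfr c (List.mem_cons_of_mem p hc')),
          List.filter_cons_of_neg (by simpa using hc)]

-- A's second loop appends the not-yet-seen non-preferred columns, i.e. a filtered ordered dedup
lemma second_loop_eq_dedup_filter (cols : List String) :
    ∀ (rest seen : List String), (∀ c ∈ rest, c ∈ cols) →
    rest.foldl (fun sel column => if column ∉ sel then sel ++ [column] else sel)
      (pvPreferred.filter (fun p => decide (p ∈ cols))
        ++ (PySem.List.dedup seen).filter (fun c => decide (c ∉ pvPreferred)))
    = pvPreferred.filter (fun p => decide (p ∈ cols))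
        ++ (PySem.List.dedup (seen ++ rest)).filter (fun c => decide (c ∉ pvPreferred)) := by
  intro rest
  induction rest with
  | nil => intro seen _; simp
  | cons c rest ih =>
    intro seen hrest
    have hc : c ∈ cols := hrest c List.mem_cons_self
    have hseen : seen ++ c :: rest = (seen ++ [c]) ++ rest := by simp
    rw [List.foldl_cons, hseen]
    have hded : PySem.List.dedup (seen ++ [c])
        = if c ∈ PySem.List.dedup seen then PySem.List.dedup seen
          else PySem.List.dedup seen ++ [c] := by
      rw [PySem.List.dedup_eq_ofList, PySem.List.dedup_eq_ofList,
          PySem.Set.ofList_append_singleton]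
      by_cases hm : c ∈ PySem.Set.ofList seen
      · rw [PySem.Set.add_of_mem hm, if_pos (by simpa [PySem.List.dedup_eq_ofList] using hm)]
      · rw [PySem.Set.add_of_not_mem hm, if_neg (by simpa [PySem.List.dedup_eq_ofList] using hm)]
    by_cases hp : c ∈ pvPreferred
    · -- c is preferred and present in cols, hence already selected
      rw [if_neg (by
          simp only [not_not, List.mem_append]
          exact Or.inl (List.mem_filter.mpr ⟨hp, by simpa using hc⟩))]
      have hfil : (PySem.List.dedup (seen ++ [c])).filter (fun c => decide (c ∉ pvPreferred))
          = (PySem.List.dedup seen).filter (fun c => decide (c ∉ pvPreferred)) := by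
        rw [hded]
        split
        · rfl
        · rw [List.filter_append, List.filter_cons_of_neg (by simpa using hp),
              List.filter_nil, List.append_nil]
      rw [← hfil, ih (seen ++ [c]) (fun d hd => hrest d (List.mem_cons_of_mem c hd))]
    · by_cases hs : c ∈ seen
      · -- c already seen earlier, hence already selected
        rw [if_neg (by
            simp only [not_not, List.mem_append]
            exact Or.inr (List.mem_filter.mpr
              ⟨(PySem.List.mem_dedup seen c).mpr hs, by simpa using hp⟩))]
        have hded' : PySem.List.dedup (seen ++ [c]) = PySem.List.dedup seen := by
          rw [hded, if_pos ((PySem.List.mem_dedup seen c).mpr hs)]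
        rw [← hded', ih (seen ++ [c]) (fun d hd => hrest d (List.mem_cons_of_mem c hd))]
      · -- fresh non-preferred column: appended at the end
        have hnotsel : c ∉ pvPreferred.filter (fun p => decide (p ∈ cols))
            ++ (PySem.List.dedup seen).filter (fun c => decide (c ∉ pvPreferred)) := by
          rw [List.mem_append]
          rintro (h | h)
          · exact hp (List.mem_of_mem_filter h)
          · exact hs ((PySem.List.mem_dedup seen c).mp (List.mem_of_mem_filter h))
        rw [if_pos hnotsel]
        have hded' : PySem.List.dedup (seen ++ [c]) = PySem.List.dedup seen ++ [c] := by
          rw [hded, if_neg (fun h => hs ((PySem.List.mem_dedup seen c).mp h))]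
        have hstep : pvPreferred.filter (fun p => decide (p ∈ cols))
              ++ (PySem.List.dedup seen).filter (fun c => decide (c ∉ pvPreferred)) ++ [c]
            = pvPreferred.filter (fun p => decide (p ∈ cols))
              ++ (PySem.List.dedup (seen ++ [c])).filter (fun c => decide (c ∉ pvPreferred)) := by
          rw [hded', List.filter_append, List.filter_cons_of_pos (by simpa using hp),
              List.filter_nil, List.append_assoc]
        rw [hstep, ih (seen ++ [c]) (fun d hd => hrest d (List.mem_cons_of_mem c hd))]

-- ===== VERDICT (by name: the statement is the Claim_ definition above) =====
theorem pick_select_columns_py_spec : Claim_equal_pick_select_columns_py := by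
  intro columns _
  show pick_select_columns_py columns = pick_select_columns_py_alt columns
  have hA : columns.foldl (fun sel column => if column ∉ sel then sel ++ [column] else sel)
      (pvPreferred.foldl
        (fun sel column => if column ∈ columns ∧ column ∉ sel then sel ++ [column] else sel) [])
      = pvT (PySem.List.dedup columns) := by
    rw [first_loop_eq_filter columns pvPreferred [] (by decide) (by simp), List.nil_append]
    have h2 := second_loop_eq_dedup_filter columns columns [] (fun _ h => h)
    rw [List.nil_append, show PySem.List.dedup ([] : List String) = [] from rfl,
        List.filter_nil, List.append_nil] at h2
    rw [h2]
    unfold pvT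
    congr 1
    apply List.filter_congr
    intro p _
    simp
  have hB : PySem.List.sorted (PySem.List.dedup columns) pvKey = pvT (PySem.List.dedup columns) := by
    rw [PySem.List.sorted_eq_foldl_insertBy]
    exact foldl_insertBy_eq_T _ (PySem.List.nodup_dedup columns)
  show PySem.List.slice
      (columns.foldl (fun sel column => if column ∉ sel then sel ++ [column] else sel)
        (pvPreferred.foldl
          (fun sel column => if column ∈ columns ∧ column ∉ sel then sel ++ [column] else sel) []))
      none (some 12)
    = PySem.List.slice (PySem.List.sorted (PySem.List.dedup columns) pvKey) none (some 12)
  rw [hA, hB]
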